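-- pv_equiv track=rewrite | github.com/imaharu/Lab | HRED/create_sin_dict.py | word_padding
-- ===== SOURCE A (Python) =====
-- def word_padding(docs, max_ds_num):
--     for i in range(0, max_ds_num):
--         max_word_num = max([*map(lambda x: len(x), [ sentence[i] for sentence in docs ] ) ])
--         for j in range(0, len(docs)):
--             sl = len(docs[j][i])
--             if sl < max_word_num:
--                 padding_word = [0] * (max_word_num - sl)
--                 docs[j][i].extend(padding_word)
--     return docs
-- ===== SOURCE B (Python) =====
-- def word_padding(docs, max_ds_num):
--     # Transposition-based: flip to column-major with zip, pad whole columns,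
--     # flip back and reattach the untouched tails. Returns a new list (does
--     # not mutate docs in place like the original).
--     n = max(max_ds_num, 0)
--     if not docs or n == 0:
--         return docs
--     cols = zip(*(doc[:n] for doc in docs))
--     padded = []
--     for col in cols:
--         m = max(len(s) for s in col)
--         padded.append([s + [0] * (m - len(s)) for s in col])
--     rows = zip(*padded)
--     return [list(row) + doc[n:] for row, doc in zip(rows, docs)]
-- ===== Notes on version B (the rewrite author's own statement) =====
-- stated objective: alternative
-- what changed: Replaces A's nested index loops (recompute each column max, then pad docs[j][i] in place) with a transposition pipeline: zip docs to column-major, pad each whole column to its max, zip back and reattach the untouched tails; B returns new lists instead of mutating docs.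
import Mathlib
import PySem

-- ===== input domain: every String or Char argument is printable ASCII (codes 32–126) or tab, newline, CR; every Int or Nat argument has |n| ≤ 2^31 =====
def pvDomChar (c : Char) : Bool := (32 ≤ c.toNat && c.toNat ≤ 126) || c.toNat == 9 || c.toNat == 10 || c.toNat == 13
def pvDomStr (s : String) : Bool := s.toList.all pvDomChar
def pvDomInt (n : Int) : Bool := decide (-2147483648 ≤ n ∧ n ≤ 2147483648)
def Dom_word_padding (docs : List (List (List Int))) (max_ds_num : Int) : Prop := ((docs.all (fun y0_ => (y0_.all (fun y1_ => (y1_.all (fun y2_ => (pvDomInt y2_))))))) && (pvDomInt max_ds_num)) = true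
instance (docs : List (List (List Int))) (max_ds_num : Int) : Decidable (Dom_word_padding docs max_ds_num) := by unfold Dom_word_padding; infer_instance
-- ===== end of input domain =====

-- B replaces A's nested index loops (per-column max recomputed and padded in place) with a
-- transposition pipeline: flip to column-major with zip, pad each whole column, flip back and
-- reattach untouched tails; equivalence is about the RETURN value only (A pads `docs` in place,
-- B builds new lists).

-- ===== PORT A =====

-- docs[j][i].extend(padding_word) on one sentence list (the body of A's inner loop)
def pvPadA (m : Int) (s : List Int) : List Int :=
  if (s.length : Int) < m then s ++ List.replicate (m - (s.length : Int)).toNat 0 else s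

-- in-place update of docs[j] at index i (i comes from range(0, max_ds_num), hence is
-- non-negative, so `.toNat` is exact here)
def pvModifyA : List (List Int) → Nat → List Int → List (List Int)
  | [], _, _ => []
  | _ :: xs, 0, v => v :: xs
  | x :: xs, Nat.succ k, v => x :: pvModifyA xs k v

-- max([*map(lambda x: len(x), [sentence[i] for sentence in docs])]) — out-of-range
-- sentence[i] (IndexError) and empty docs (ValueError) are excluded by Pre_
def pvColMaxA (acc : List (List (List Int))) (i : Int) : Int :=
  ((PySem.List.max?
      (((acc.map (fun sentence => (PySem.List.pyGet? sentence i).getD [])).map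
        (fun x => (x.length : Int))))
      (fun y => y))).getD 0

-- the j-loop over docs, with the column max m already computed
def pvLoopJ (acc : List (List (List Int))) (i : Int) (m : Int) : List (List (List Int)) :=
  acc.map (fun doc =>
    pvModifyA doc i.toNat (pvPadA m ((PySem.List.pyGet? doc i).getD [])))

-- one iteration of A's outer loop: compute the column max, then the j-loop over docs
def pvStepA (acc : List (List (List Int))) (i : Int) : List (List (List Int)) :=
  pvLoopJ acc i (pvColMaxA acc i)

def word_padding (docs : List (List (List Int))) (max_ds_num : Int) : List (List (List Int)) :=
  (PySem.List.pyRange 0 max_ds_num 1).foldl pvStepA docs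

-- ===== PORT B =====

-- zip(*xss): Python's transposition — stops as soon as one row is exhausted
def pvZipStar {α : Type} (xss : List (List α)) : List (List α) :=
  if xss.isEmpty || xss.any List.isEmpty then []
  else (xss.filterMap List.head?) :: pvZipStar (xss.map List.tail)
termination_by (xss.headD []).length
decreasing_by
  cases xss with
  | nil => simp_all
  | cons x r =>
    cases x with
    | nil => simp_all
    | cons a t => simp

-- one column: m = max(len(s) for s in col); [s + [0]*(m-len(s)) for s in col]
def pvPadColB (col : List (List Int)) : List (List Int) :=
  let m : Int := ((PySem.List.max? (col.map (fun s => (s.length : Int))) (fun y => y)).getD 0)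
  col.map (fun s => s ++ List.replicate (m - (s.length : Int)).toNat 0)

def word_padding_alt (docs : List (List (List Int))) (max_ds_num : Int) : List (List (List Int)) :=
  let n := max_ds_num.toNat          -- n = max(max_ds_num, 0)
  if docs.isEmpty || n == 0 then docs
  else
    let cols := pvZipStar (docs.map (fun doc => doc.take n))   -- zip(*(doc[:n] for doc in docs))
    let padded := cols.map pvPadColB
    let rows := pvZipStar padded                               -- zip(*padded)
    (List.zip rows docs).map (fun p => p.1 ++ p.2.drop n)      -- list(row) + doc[n:]

-- ===== PRECONDITION & SPEC =====
-- Exactly the inputs on which A returns: for a positive max_ds_num, A's per-column max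
-- raises ValueError on empty docs and sentence[i] raises IndexError on any doc shorter
-- than max_ds_num; for max_ds_num ≤ 0 the loop body never runs.
def Pre_word_padding (docs : List (List (List Int))) (max_ds_num : Int) : Prop :=
  max_ds_num ≤ 0 ∨ (docs ≠ [] ∧ ∀ doc ∈ docs, max_ds_num ≤ (doc.length : Int))

instance (docs : List (List (List Int))) (max_ds_num : Int) : Decidable (Pre_word_padding docs max_ds_num) := by unfold Pre_word_padding; infer_instance

def pvWitness_word_padding : List (List (List Int)) × Int :=
  ([[[1], []], [[], [2, 3]]], 2)

def Spec_word_padding (docs : List (List (List Int))) (max_ds_num : Int) (out : List (List (List Int))) : Prop := out = word_padding_alt docs max_ds_num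
instance (docs : List (List (List Int))) (max_ds_num : Int) (out : List (List (List Int))) : Decidable (Spec_word_padding docs max_ds_num out) := by unfold Spec_word_padding; infer_instance

-- ===== CLAIM (what is proved, stated in full; the proofs are below) =====
def Claim_equal_word_padding : Prop := ∀ (docs : List (List (List Int))) (max_ds_num : Int), Dom_word_padding docs max_ds_num → Pre_word_padding docs max_ds_num → Spec_word_padding docs max_ds_num (word_padding docs max_ds_num)

-- ===== LEMMAS AND PROOFS =====

-- column max at a Nat index, stated over the original docs
def pvMx (docs : List (List (List Int))) (i : Nat) : Int :=
  ((PySem.List.max?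
      (docs.map (fun doc => (((doc[i]?).getD []).length : Int)))
      (fun y => y))).getD 0

-- canonical per-doc padding with a precomputed max table (proof-side only)
def pvPadDocB : List (List Int) → List Int → List (List Int)
  | d, [] => d
  | [], _ :: _ => []
  | s :: d, m :: ms => (s ++ List.replicate (m - (s.length : Int)).toNat 0) :: pvPadDocB d ms

-- B's padding never touches entries at or beyond maxes.length
theorem pvPadDocB_get?_high (d : List (List Int)) (ms : List Int) (j : Nat)
    (h : ms.length ≤ j) : (pvPadDocB d ms)[j]? = d[j]? := by
  induction ms generalizing d j with
  | nil => simp [pvPadDocB]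
  | cons m ms ih =>
    cases d with
    | nil => simp [pvPadDocB]
    | cons s d =>
      cases j with
      | zero => simp at h
      | succ j =>
        simp only [pvPadDocB, List.getElem?_cons_succ]
        exact ih d j (by simpa using Nat.le_of_succ_le_succ h)

theorem pvPadA_eq (m : Int) (s : List Int) :
    pvPadA m s = s ++ List.replicate (m - (s.length : Int)).toNat 0 := by
  unfold pvPadA
  split_ifs with h
  · rfl
  · have : (m - (s.length : Int)).toNat = 0 := by omega
    simp [this]

-- A's per-doc step on an already-partially-padded doc extends the pad table by one column
theorem pvModify_padDoc (d : List (List Int)) (ms : List Int) (m : Int)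
    (h : ms.length < d.length) :
    pvModifyA (pvPadDocB d ms) ms.length
        (pvPadA m ((PySem.List.pyGet? (pvPadDocB d ms) (ms.length : Int)).getD []))
      = pvPadDocB d (ms ++ [m]) := by
  induction ms generalizing d with
  | nil =>
    cases d with
    | nil => simp at h
    | cons s d =>
      simp [pvPadDocB, pvModifyA, pvPadA_eq]
  | cons m0 ms ih =>
    cases d with
    | nil => simp at h
    | cons s d =>
      simp only [pvPadDocB, List.length_cons, List.cons_append, pvModifyA,
        PySem.List.pyGet?_natCast, List.getElem?_cons_succ]
      refine congrArg _ ?_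
      have := ih d (by simp only [List.length_cons] at h; omega)
      simpa [PySem.List.pyGet?_natCast] using this

theorem pvColMax_padded (docs : List (List (List Int))) (ms : List Int) (k : Nat)
    (hk : ms.length ≤ k) :
    pvColMaxA (docs.map (fun doc => pvPadDocB doc ms)) (k : Int) = pvMx docs k := by
  unfold pvColMaxA pvMx
  congr 2
  simp only [List.map_map]
  refine List.map_congr_left (fun doc _ => ?_)
  simp [PySem.List.pyGet?_natCast, pvPadDocB_get?_high doc ms k hk]

-- the fold of A's steps over range(0, k) is the canonical pad with the first-k max table
theorem pv_fold_eq (docs : List (List (List Int))) (k : Nat)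
    (hlen : ∀ doc ∈ docs, (k : Int) ≤ (doc.length : Int)) :
    ((List.range k).map (fun j => ((j : Nat) : Int))).foldl pvStepA docs
      = docs.map (fun doc => pvPadDocB doc ((List.range k).map (fun j => pvMx docs j))) := by
  induction k with
  | zero =>
    simp [pvPadDocB]
  | succ k ih =>
    have hlen' : ∀ doc ∈ docs, (k : Int) ≤ (doc.length : Int) := by
      intro doc hd; have := hlen doc hd; push_cast at this ⊢; omega
    rw [List.range_succ]
    simp only [List.map_append, List.map_cons, List.map_nil, List.foldl_append,
      List.foldl_cons, List.foldl_nil]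
    rw [ih hlen']
    set ms := (List.range k).map (fun j => pvMx docs j) with hms
    have hmslen : ms.length = k := by simp [hms]
    have hcm : pvColMaxA (docs.map (fun doc => pvPadDocB doc ms)) (k : Int) = pvMx docs k :=
      pvColMax_padded docs ms k (by omega)
    rw [pvStepA, hcm]
    unfold pvLoopJ
    rw [List.map_map]
    refine List.map_congr_left (fun doc hd => ?_)
    simp only [Function.comp]
    have hlt : ms.length < doc.length := by
      have := hlen doc hd; push_cast at this; omega
    have := pvModify_padDoc doc ms (pvMx docs k) hlt
    rw [hmslen] at this
    simpa [Int.toNat_natCast] using this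

-- filterMap that is everywhere `some` is a map
theorem pv_filterMap_eq_map {α β : Type} (l : List α) (f : α → Option β) (g : α → β)
    (h : ∀ x ∈ l, f x = some (g x)) : l.filterMap f = l.map g := by
  induction l with
  | nil => rfl
  | cons x t ih =>
    simp only [List.filterMap_cons, h x (List.mem_cons_self), List.map_cons]
    exact congrArg _ (ih (fun y hy => h y (List.mem_cons_of_mem _ hy)))

-- transposition of a nonempty rectangular matrix, column by column
theorem pvZipStar_rect {α : Type} (n : Nat) (xss : List (List α)) (hne : xss ≠ [])
    (hl : ∀ l ∈ xss, l.length = n) :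
    pvZipStar xss = (List.range n).map (fun i => xss.filterMap (fun l => l[i]?)) := by
  induction n generalizing xss with
  | zero =>
    have : xss.any List.isEmpty = true := by
      cases xss with
      | nil => simp at hne
      | cons x r =>
        simp only [List.any_cons, Bool.or_eq_true]
        left
        simp [List.isEmpty_iff, List.eq_nil_of_length_eq_zero (hl x List.mem_cons_self)]
    rw [pvZipStar]
    simp [this]
  | succ n ih =>
    have hno : xss.any List.isEmpty = false := by
      simp only [List.any_eq_false]
      intro l hlmem
      have := hl l hlmem
      simp [List.isEmpty_iff]
      intro h0; rw [h0] at this; simp at this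
    rw [pvZipStar]
    have hie : xss.isEmpty = false := by simp [List.isEmpty_iff, hne]
    simp only [hie, hno, Bool.or_self, if_neg Bool.false_ne_true]
    have htne : xss.map List.tail ≠ [] := by simpa using hne
    have htl : ∀ l ∈ xss.map List.tail, l.length = n := by
      intro l hlmem
      rcases List.mem_map.mp hlmem with ⟨l0, hl0, rfl⟩
      have := hl l0 hl0
      simp [List.length_tail, this]
    rw [ih (xss.map List.tail) htne htl]
    rw [List.range_succ_eq_map]
    simp only [List.map_cons, List.map_map]
    congr 1
    case _ =>
      refine List.filterMap_congr (fun l hlmem => ?_)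
      have := hl l hlmem
      cases l with
      | nil => simp at this
      | cons a t => simp
    case _ =>
      refine List.map_congr_left (fun i _ => ?_)
      rw [List.filterMap_map]
      refine List.filterMap_congr (fun l hlmem => ?_)
      have := hl l hlmem
      cases l with
      | nil => simp at this
      | cons a t => simp [Function.comp]

-- expanding the canonical padding as an indexed map plus the untouched tail
theorem pvPadDocB_expand (ms : List Int) (d : List (List Int)) (h : ms.length ≤ d.length) :
    pvPadDocB d ms
      = (List.range ms.length).map (fun i =>
          ((d[i]?).getD []) ++
            List.replicate (((ms[i]?).getD 0) - (((d[i]?).getD []).length : Int)).toNat 0)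
        ++ d.drop ms.length := by
  induction ms generalizing d with
  | nil => simp [pvPadDocB]
  | cons m ms ih =>
    cases d with
    | nil => simp at h
    | cons s d =>
      simp only [pvPadDocB, List.length_cons, List.range_succ_eq_map, List.map_cons,
        List.map_map, List.getElem?_cons_zero, Option.getD_some, List.cons_append,
        List.drop_succ_cons]
      refine congrArg _ ?_
      rw [ih d (by simpa using Nat.le_of_succ_le_succ h)]
      refine congrArg (· ++ d.drop ms.length) ?_
      refine List.map_congr_left (fun i _ => ?_)
      simp [Function.comp]

-- the transpose–pad–transpose pipeline of B equals the canonical padding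
theorem pv_B_branch (docs : List (List (List Int))) (n : Nat) (hn : 0 < n)
    (hne : docs ≠ []) (hlen : ∀ doc ∈ docs, n ≤ doc.length) :
    (List.zip (pvZipStar ((pvZipStar (docs.map (fun doc => doc.take n))).map pvPadColB)) docs).map
        (fun p => p.1 ++ p.2.drop n)
      = docs.map (fun doc => pvPadDocB doc ((List.range n).map (fun j => pvMx docs j))) := by
  -- step 1: columns
  have hcols : pvZipStar (docs.map (fun doc => doc.take n))
      = (List.range n).map (fun i => docs.map (fun d => (d[i]?).getD [])) := by
    rw [pvZipStar_rect n _ (by simpa using hne)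
      (by
        intro l hlmem
        rcases List.mem_map.mp hlmem with ⟨d, hd, rfl⟩
        simp [Nat.min_eq_left (hlen d hd)])]
    refine List.map_congr_left (fun i hi => ?_)
    rw [List.filterMap_map]
    refine pv_filterMap_eq_map _ _ _ (fun d hd => ?_)
    have hi' : i < n := List.mem_range.mp hi
    have hd' : i < d.length := Nat.lt_of_lt_of_le hi' (hlen d hd)
    simp [Function.comp, List.getElem?_take, hi', List.getElem?_eq_getElem hd']
  set L := docs.length with hL
  have hLpos : 0 < L := by
    cases docs with
    | nil => simp at hne
    | cons _ _ => simp [hL]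
  -- step 2: rows
  have hpadlen : ∀ l ∈ ((List.range n).map (fun i => docs.map (fun d => (d[i]?).getD []))).map pvPadColB,
      l.length = L := by
    intro l hlmem
    rcases List.mem_map.mp hlmem with ⟨c, hc, rfl⟩
    rcases List.mem_map.mp hc with ⟨i, _, rfl⟩
    simp [pvPadColB, hL]
  have hrows : pvZipStar (((List.range n).map (fun i => docs.map (fun d => (d[i]?).getD []))).map pvPadColB)
      = (List.range L).map (fun j =>
          (List.range n).map (fun i =>
            ((docs[j]?).getD []).getD i [] ++
              List.replicate ((pvMx docs i) - ((((docs[j]?).getD []).getD i []).length : Int)).toNat 0)) := by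
    rw [pvZipStar_rect L _ (by
        simp only [ne_eq, List.map_eq_nil_iff, List.map_eq_nil_iff, List.range_eq_nil]
        omega) hpadlen]
    refine List.map_congr_left (fun j hj => ?_)
    have hj' : j < L := List.mem_range.mp hj
    rw [List.filterMap_map, List.filterMap_map]
    refine pv_filterMap_eq_map _ _ _ (fun i _ => ?_)
    simp only [Function.comp, pvPadColB]
    have hm : ((PySem.List.max?
        ((docs.map (fun d => (d[i]?).getD [])).map (fun s => (s.length : Int)))
        (fun y => y))).getD 0 = pvMx docs i := by
      unfold pvMx; rw [List.map_map]; rfl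
    rw [hm]
    have hmm : (docs.map (fun d => (d[i]?).getD [])).map
        (fun s => s ++ List.replicate ((pvMx docs i) - (s.length : Int)).toNat 0)
        = docs.map (fun d => ((d[i]?).getD []) ++
            List.replicate ((pvMx docs i) - (((d[i]?).getD []).length : Int)).toNat 0) := by
      rw [List.map_map]; rfl
    rw [hmm, List.getElem?_map, List.getElem?_eq_getElem hj']
    simp
  rw [hcols, hrows]
  -- step 3: final pointwise comparison
  refine List.ext_getElem ?_ (fun j h1 h2 => ?_)
  · simp [hL]
  · have hj : j < L := by simpa [hL] using h2
    have hzl : j < (List.zip ((List.range L).map (fun j =>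
        (List.range n).map (fun i =>
          ((docs[j]?).getD []).getD i [] ++
            List.replicate ((pvMx docs i) - ((((docs[j]?).getD []).getD i []).length : Int)).toNat 0))) docs).length := by
      simpa [hL] using hj
    rw [List.getElem_map, List.getElem_zip, List.getElem_map, List.getElem_map, List.getElem_range]
    have hdl : ((List.range n).map (fun i => pvMx docs i)).length ≤ (docs[j]).length := by
      simpa using hlen (docs[j]) (List.getElem_mem hj)
    rw [pvPadDocB_expand _ _ hdl]
    simp only [List.length_map, List.length_range]
    refine congrArg (fun r => r ++ (docs[j]).drop n) ?_
    refine List.map_congr_left (fun i hi => ?_)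
    have hi' : i < n := List.mem_range.mp hi
    rw [List.getElem?_eq_getElem hj]
    simp only [Option.getD_some]
    rw [List.getElem?_map, List.getElem?_range hi']
    simp

theorem pv_main (docs : List (List (List Int))) (n : Int)
    (hpre : Pre_word_padding docs n) :
    word_padding docs n = word_padding_alt docs n := by
  unfold word_padding word_padding_alt
  rcases le_or_gt n 0 with hn | hn
  · rw [PySem.List.pyRange_one_eq_nil (by omega)]
    have : n.toNat = 0 := by omega
    simp [this]
  · rcases hpre with h | ⟨hne, hlen⟩
    · omega
    have hie : docs.isEmpty = false := by simp [List.isEmpty_iff, hne]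
    have hnt : 0 < n.toNat := by omega
    have hguard : (docs.isEmpty || n.toNat == 0) = false := by
      simp [hie]; omega
    simp only [hguard, if_neg Bool.false_ne_true]
    have hr : PySem.List.pyRange 0 n 1 = (List.range n.toNat).map (fun j => ((j : Nat) : Int)) := by
      rw [PySem.List.pyRange_one]
      simp
    rw [hr]
    have hlen' : ∀ doc ∈ docs, ((n.toNat : Nat) : Int) ≤ (doc.length : Int) := by
      intro doc hd; have := hlen doc hd; omega
    rw [pv_fold_eq docs n.toNat hlen']
    exact (pv_B_branch docs n.toNat hnt hne (fun doc hd => by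
      have := hlen doc hd; omega)).symm

-- ===== VERDICT (by name: the statement is the Claim_ definition above) =====
theorem word_padding_spec : Claim_equal_word_padding := by
  intro docs n _ hpre
  unfold Spec_word_padding
  exact pv_main docs n hpre
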